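-- pv_equiv track=rewrite | github.com/blessleydylan/CP125-Class-Repo-2 | labs/lab06/exercise10/exercise10.py | filter_by_threshold
-- ===== SOURCE A (Python) =====
-- def count_unique_events(attendance_logs, attendee_id):
--     """Count how many unique events this attendee attended."""
--     unique_events = set()
--     for att_id, event_name in attendance_logs:
--         if att_id == attendee_id:
--             unique_events.add(event_name)
--     event_count = len(unique_events)
--     return event_count
--
-- def filter_by_threshold(attendees, attendance_logs, min_events):
--     """Return sorted list of attendees who attended >= min_events."""
--     qualified = []
--
--     for attendee_id in attendees:
--         event_count = count_unique_events(attendance_logs, attendee_id)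
--
--         if event_count >= min_events:
--             qualified.append(attendee_id)
--     qualified.sort()
--
--     return qualified
-- ===== SOURCE B (Python) =====
-- def filter_by_threshold(attendees, attendance_logs, min_events):
--     """Return sorted list of attendees who attended >= min_events."""
--     events_by_attendee = {}
--     for att_id, event_name in attendance_logs:
--         events_by_attendee.setdefault(att_id, set()).add(event_name)
--     return sorted(a for a in attendees
--                   if len(events_by_attendee.get(a, ())) >= min_events)
-- ===== Notes on version B (the rewrite author's own statement) =====
-- stated objective: faster
-- what changed: Instead of rescanning all attendance logs once per attendee, B groups the logs into an attendee-to-event-set dict in a single pass and then filters attendees by set size.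
import Mathlib
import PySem

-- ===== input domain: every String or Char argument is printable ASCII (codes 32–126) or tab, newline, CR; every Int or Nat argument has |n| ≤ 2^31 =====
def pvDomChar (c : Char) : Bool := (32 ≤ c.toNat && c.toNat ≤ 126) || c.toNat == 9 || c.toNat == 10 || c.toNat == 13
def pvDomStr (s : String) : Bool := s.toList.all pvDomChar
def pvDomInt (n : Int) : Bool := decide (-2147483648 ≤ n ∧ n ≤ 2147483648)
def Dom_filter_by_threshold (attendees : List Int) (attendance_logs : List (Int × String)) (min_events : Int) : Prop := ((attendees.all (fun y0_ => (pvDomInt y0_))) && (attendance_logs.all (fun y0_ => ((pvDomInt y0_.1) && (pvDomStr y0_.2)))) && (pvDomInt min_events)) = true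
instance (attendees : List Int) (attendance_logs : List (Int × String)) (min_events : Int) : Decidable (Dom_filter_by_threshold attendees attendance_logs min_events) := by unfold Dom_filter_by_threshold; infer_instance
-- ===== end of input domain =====

-- B groups the logs into an attendee→event-set dict in ONE pass, then filters attendees (A rescans all logs per attendee).

-- ===== PORT A =====
def count_unique_events (attendance_logs : List (Int × String)) (attendee_id : Int) : Int :=
  -- unique_events = set(); for att_id, event_name in logs: if att_id == attendee_id: add
  let unique_events : PySem.Set String :=
    attendance_logs.foldl
      (fun s p => if p.1 == attendee_id then PySem.Set.add s p.2 else s)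
      PySem.Set.empty
  (PySem.Set.len unique_events : Int)

def filter_by_threshold (attendees : List Int) (attendance_logs : List (Int × String)) (min_events : Int) : List Int :=
  let qualified : List Int :=
    attendees.foldl
      (fun acc attendee_id =>
        if count_unique_events attendance_logs attendee_id ≥ min_events
        then acc ++ [attendee_id] else acc)
      []
  PySem.List.sorted qualified (fun x => x) false

-- ===== PORT B =====
def filter_by_threshold_alt (attendees : List Int) (attendance_logs : List (Int × String)) (min_events : Int) : List Int :=
  let events_by_attendee : PySem.Dict Int (PySem.Set String) :=
    attendance_logs.foldl
      (fun d p => d.modify p.1 PySem.Set.empty (fun s => PySem.Set.add s p.2))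
      PySem.Dict.empty
  PySem.List.sorted
    (attendees.filter
      (fun a => (PySem.Set.len (events_by_attendee.getD a PySem.Set.empty) : Int) ≥ min_events))
    (fun x => x) false

-- ===== PRECONDITION & SPEC =====
def Spec_filter_by_threshold (attendees : List Int) (attendance_logs : List (Int × String)) (min_events : Int) (out : List Int) : Prop := out = filter_by_threshold_alt attendees attendance_logs min_events
instance (attendees : List Int) (attendance_logs : List (Int × String)) (min_events : Int) (out : List Int) : Decidable (Spec_filter_by_threshold attendees attendance_logs min_events out) := by unfold Spec_filter_by_threshold; infer_instance

-- ===== CLAIM (what is proved, stated in full; the proofs are below) =====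
def Claim_equal_filter_by_threshold : Prop := ∀ (attendees : List Int) (attendance_logs : List (Int × String)) (min_events : Int), Dom_filter_by_threshold attendees attendance_logs min_events → Spec_filter_by_threshold attendees attendance_logs min_events (filter_by_threshold attendees attendance_logs min_events)

-- ===== LEMMAS AND PROOFS =====

-- B's dict lookup at v is exactly A's per-attendee filtered set-building loop.
theorem getD_group_fold (l : List (Int × String)) (d : PySem.Dict Int (PySem.Set String)) (v : Int) :
    (l.foldl (fun d p => d.modify p.1 PySem.Set.empty (fun s => PySem.Set.add s p.2)) d).getD v PySem.Set.empty
      = l.foldl (fun s p => if p.1 == v then PySem.Set.add s p.2 else s) (d.getD v PySem.Set.empty) := by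
  induction l generalizing d with
  | nil => rfl
  | cons p t ih =>
    simp only [List.foldl_cons, ih]
    congr 1
    rw [PySem.Dict.getD_modify]
    by_cases h : v = p.1
    · subst h; simp
    · rw [if_neg h, if_neg (by simpa [beq_iff_eq] using fun hc => h hc.symm)]

theorem filter_by_threshold_eq (attendees : List Int) (attendance_logs : List (Int × String)) (min_events : Int) :
    filter_by_threshold attendees attendance_logs min_events
      = filter_by_threshold_alt attendees attendance_logs min_events := by
  unfold filter_by_threshold filter_by_threshold_alt count_unique_events
  simp only [PySem.List.foldl_append_ite_eq_filter, List.nil_append]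
  congr 1
  apply List.filter_congr
  intro a _
  rw [getD_group_fold]
  simp [PySem.Dict.getD, PySem.Dict.get?, PySem.Dict.empty]

-- ===== VERDICT (by name: the statement is the Claim_ definition above) =====
theorem filter_by_threshold_spec : Claim_equal_filter_by_threshold := by
  intro attendees logs m _
  unfold Spec_filter_by_threshold
  exact filter_by_threshold_eq attendees logs m
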